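-- pv_equiv track=rewrite | github.com/mostofashakib/Degree4-Interpolating-Polynomial-using-QR-MGS-algorithm | main.py | degreeFour
-- ===== SOURCE A (Python) =====
-- def degreeFour(x):
--   """ Computes the degree 4 vandermonde matrix
--
--         This function takes in a vector, represented as lists, then builds the degree 4 vandermonde matrix A and returns it as a list.
--
--         Args:
--              x: An arbitary vector of arbitary length.
--
--         Returns:
--              A degree 4 vandermonde matrix.
--   """
--   result = []
--   for exponent in range(5):
--     temp = []
--     for element in range(len(x)):
--       temp.append(x[element]**exponent)
--     result.append(temp)
--   return result
-- ===== SOURCE B (Python) =====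
-- def degreeFour(x):
--     # Simpler decomposition: maintain a running power vector and build each
--     # row from the previous one instead of recomputing x[i]**e independently.
--     current = [1] * len(x)
--     result = [current]
--     for _ in range(4):
--         current = [c * v for c, v in zip(current, x)]
--         result.append(current)
--     return result
-- ===== Notes on version B (the rewrite author's own statement) =====
-- stated objective: simpler
-- what changed: B keeps a running power vector, deriving each row by one element-wise multiplication with x (incremental products via zip), instead of A's nested loops computing x[i]**e from scratch for every cell.
import Mathlib
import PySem

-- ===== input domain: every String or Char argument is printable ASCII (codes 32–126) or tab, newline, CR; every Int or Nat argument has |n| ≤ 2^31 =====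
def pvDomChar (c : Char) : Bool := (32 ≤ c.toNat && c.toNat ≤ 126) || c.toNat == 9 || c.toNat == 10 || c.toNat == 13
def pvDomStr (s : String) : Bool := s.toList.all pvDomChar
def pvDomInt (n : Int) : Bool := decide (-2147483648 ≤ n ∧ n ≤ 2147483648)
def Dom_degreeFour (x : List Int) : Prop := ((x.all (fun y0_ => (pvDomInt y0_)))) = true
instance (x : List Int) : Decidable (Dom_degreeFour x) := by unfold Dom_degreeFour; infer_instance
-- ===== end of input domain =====

-- B builds each Vandermonde row from the previous one by an element-wise product
-- (running power vector) instead of A's nested loops computing x[i]**e per cell; objective: simpler.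

-- ===== PORT A =====
-- literal port of A: outer loop over range(5), inner loop over range(len(x)),
-- x[element]**exponent (exponent is always 0..4, so '^ exponent.toNat' is exact).
def degreeFour (x : List Int) : List (List Int) :=
  (PySem.List.pyRange 0 5 1).foldl
    (fun result exponent =>
      result ++
        [(PySem.List.pyRange 0 (x.length : Int) 1).foldl
          (fun temp element => temp ++ [(PySem.List.pyGetD x element 0) ^ exponent.toNat])
          []])
    []

-- ===== PORT B =====
-- literal port of B: current = [1]*len(x); four times current = [c*v for c,v in zip(current,x)],
-- appending each row.
def degreeFour_alt (x : List Int) : List (List Int) :=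
  let current := x.map (fun _ => (1 : Int))
  ((List.range 4).foldl
    (fun (st : List (List Int) × List Int) _ =>
      let cur := (st.2.zip x).map (fun p => p.1 * p.2)
      (st.1 ++ [cur], cur))
    ([current], current)).1

-- ===== PRECONDITION & SPEC =====
def Spec_degreeFour (x : List Int) (out : List (List Int)) : Prop := out = degreeFour_alt x
instance (x : List Int) (out : List (List Int)) : Decidable (Spec_degreeFour x out) := by unfold Spec_degreeFour; infer_instance

-- ===== CLAIM (what is proved, stated in full; the proofs are below) =====
def Claim_equal_degreeFour : Prop := ∀ (x : List Int), Dom_degreeFour x → Spec_degreeFour x (degreeFour x)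

-- ===== LEMMAS AND PROOFS =====

-- A's inner loop is the e-th power map over x.
theorem degreeFour_row (x : List Int) (e : Nat) :
    (PySem.List.pyRange 0 (x.length : Int) 1).foldl
      (fun temp element => temp ++ [(PySem.List.pyGetD x element 0) ^ e]) []
    = x.map (fun v => v ^ e) := by
  rw [PySem.List.foldl_pyRange_zero_pyGetD' x 0 (fun temp v => temp ++ [v ^ e]) []]
  simpa using PySem.List.foldl_append_singleton_eq_map (l := x) (f := fun v => v ^ e) (acc := [])

-- B's update step bumps the exponent by one.
theorem zip_mul_step (x : List Int) (g : Int → Int) :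
    ((x.map g).zip x).map (fun p => p.1 * p.2) = x.map (fun v => g v * v) := by
  induction x with
  | nil => rfl
  | cons a t ih => simp [ih]

-- ===== VERDICT (by name: the statement is the Claim_ definition above) =====
theorem degreeFour_spec : Claim_equal_degreeFour := by
  intro x _
  unfold Spec_degreeFour degreeFour degreeFour_alt
  have h5 : PySem.List.pyRange 0 5 1 = [0, 1, 2, 3, 4] := by decide
  rw [h5]
  simp only [List.foldl, List.range, List.range.loop]
  rw [degreeFour_row x (Int.toNat 0), degreeFour_row x (Int.toNat 1),
      degreeFour_row x (Int.toNat 2), degreeFour_row x (Int.toNat 3),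
      degreeFour_row x (Int.toNat 4)]
  simp only [zip_mul_step]
  simp [pow_succ, mul_assoc]
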